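-- pv_equiv track=rewrite | github.com/stantheman070911/books | normalize_markdown_books.py | split_raw_blocks
-- ===== SOURCE A (Python) =====
-- def split_raw_blocks(lines: list[str]) -> list[list[str]]:
--     blocks: list[list[str]] = []
--     current: list[str] = []
--     for line in lines:
--         if line.strip():
--             current.append(line)
--             continue
--         if current:
--             blocks.append(current)
--             current = []
--     if current:
--         blocks.append(current)
--     return blocks
-- ===== SOURCE B (Python) =====
-- from itertools import groupby
--
--
-- def split_raw_blocks(lines: list[str]) -> list[list[str]]:
--     return [list(g) for k, g in groupby(lines, key=lambda l: bool(l.strip())) if k]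
-- ===== Notes on version B (the rewrite author's own statement) =====
-- stated objective: idiomatic
-- what changed: Replaced the explicit accumulator-and-flush loop with itertools.groupby keyed on line non-blankness, keeping only the truthy runs; the per-line branch/flush logic disappears.
import Mathlib
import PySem

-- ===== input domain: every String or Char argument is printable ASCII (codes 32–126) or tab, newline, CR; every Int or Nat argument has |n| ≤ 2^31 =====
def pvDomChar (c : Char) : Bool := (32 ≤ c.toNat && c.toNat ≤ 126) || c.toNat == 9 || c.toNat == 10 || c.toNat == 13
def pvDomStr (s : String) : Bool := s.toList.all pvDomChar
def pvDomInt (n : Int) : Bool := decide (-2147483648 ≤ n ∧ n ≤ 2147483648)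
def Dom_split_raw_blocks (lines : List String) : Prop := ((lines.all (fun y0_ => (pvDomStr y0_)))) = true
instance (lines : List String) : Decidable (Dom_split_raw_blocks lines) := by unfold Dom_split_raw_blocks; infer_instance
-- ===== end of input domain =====

-- B replaces A's accumulator-and-flush loop with a groupby on line non-blankness, keeping the truthy runs (idiomatic; same cost).

-- shared predicate: truthiness of line.strip() (= bool(l.strip()) in B's key)
def pvKeep (s : String) : Bool := !(PySem.Chars.strip s.toList).isEmpty

-- ===== PORT A =====
-- A's loop over `lines` with state (blocks, current); the trailing flush after the loop.
def split_raw_blocks (lines : List String) : List (List String) :=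
  let st := lines.foldl
    (fun (st : List (List String) × List String) line =>
      if pvKeep line then (st.1, st.2 ++ [line])
      else if st.2 ≠ [] then (st.1 ++ [st.2], []) else st)
    ([], [])
  if st.2 ≠ [] then st.1 ++ [st.2] else st.1

-- ===== PORT B =====
-- hand port of itertools.groupby(lines, key=pvKeep): maximal runs of equal key, in order
def pvGroupBy (f : String → Bool) : List String → List (Bool × List String)
  | [] => []
  | x :: xs =>
    match pvGroupBy f xs with
    | [] => [(f x, [x])]
    | (k, g) :: rest => if f x == k then (k, x :: g) :: rest else (f x, [x]) :: (k, g) :: rest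

-- the comprehension: [list(g) for k, g in groupby(...) if k]
def split_raw_blocks_alt (lines : List String) : List (List String) :=
  (pvGroupBy pvKeep lines).filterMap (fun kg => if kg.1 then some kg.2 else none)

-- ===== PRECONDITION & SPEC =====
def Spec_split_raw_blocks (lines : List String) (out : List (List String)) : Prop := out = split_raw_blocks_alt lines
instance (lines : List String) (out : List (List String)) : Decidable (Spec_split_raw_blocks lines out) := by unfold Spec_split_raw_blocks; infer_instance

-- ===== CLAIM (what is proved, stated in full; the proofs are below) =====
def Claim_equal_split_raw_blocks : Prop := ∀ (lines : List String), Dom_split_raw_blocks lines → Spec_split_raw_blocks lines (split_raw_blocks lines)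

-- ===== LEMMAS AND PROOFS =====

-- abbreviations used only by the proof
def pvExtract (gs : List (Bool × List String)) : List (List String) :=
  gs.filterMap (fun kg => if kg.1 then some kg.2 else none)

-- how a pending `current` merges with B's groups: a leading truthy run absorbs it, otherwise it is flushed in front
def pvPrepend (cur : List String) (gs : List (Bool × List String)) : List (List String) :=
  if cur = [] then pvExtract gs
  else match gs with
    | (true, g) :: rest => (cur ++ g) :: pvExtract rest
    | _ => cur :: pvExtract gs

lemma pvLoop (lines : List String) (blocks : List (List String)) (cur : List String) :
    (let st := lines.foldl
        (fun (st : List (List String) × List String) line =>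
          if pvKeep line then (st.1, st.2 ++ [line])
          else if st.2 ≠ [] then (st.1 ++ [st.2], []) else st)
        (blocks, cur)
     if st.2 ≠ [] then st.1 ++ [st.2] else st.1)
    = blocks ++ pvPrepend cur (pvGroupBy pvKeep lines) := by
  induction lines generalizing blocks cur with
  | nil =>
    by_cases h : cur = [] <;> simp [pvGroupBy, pvPrepend, pvExtract, h]
  | cons x xs ih =>
    by_cases hx : pvKeep x
    · simp only [List.foldl_cons, hx, if_pos]
      rw [ih blocks (cur ++ [x])]
      cases hgs : pvGroupBy pvKeep xs with
      | nil =>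
        have hc : cur ++ [x] ≠ [] := by simp
        simp [pvGroupBy, hgs, hx, pvPrepend, hc, pvExtract]
      | cons kg rest =>
        obtain ⟨k, g⟩ := kg
        cases k with
        | true =>
          simp [pvGroupBy, hgs, hx, pvPrepend, pvExtract]
        | false =>
          have hc : cur ++ [x] ≠ [] := by simp
          simp [pvGroupBy, hgs, hx, pvPrepend, hc, pvExtract]
    · simp only [List.foldl_cons, hx, Bool.false_eq_true, if_false]
      by_cases hc : cur = []
      · simp only [hc, ne_eq, not_true_eq_false, reduceIte]
        rw [ih blocks []]
        cases hgs : pvGroupBy pvKeep xs with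
        | nil => simp [pvGroupBy, hgs, hx, pvPrepend, pvExtract]
        | cons kg rest =>
          obtain ⟨k, g⟩ := kg
          cases k with
          | true => simp [pvGroupBy, hgs, hx, pvPrepend, pvExtract]
          | false => simp [pvGroupBy, hgs, hx, pvPrepend, pvExtract]
      · simp only [ne_eq, hc, not_false_eq_true, reduceIte]
        rw [ih (blocks ++ [cur]) []]
        cases hgs : pvGroupBy pvKeep xs with
        | nil => simp [pvGroupBy, hgs, hx, pvPrepend, pvExtract, hc]
        | cons kg rest =>
          obtain ⟨k, g⟩ := kg
          cases k with
          | true => simp [pvGroupBy, hgs, hx, pvPrepend, pvExtract, hc]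
          | false => simp [pvGroupBy, hgs, hx, pvPrepend, pvExtract, hc]

-- ===== VERDICT (by name: the statement is the Claim_ definition above) =====
theorem split_raw_blocks_spec : Claim_equal_split_raw_blocks := by
  intro lines _
  show split_raw_blocks lines = split_raw_blocks_alt lines
  have h := pvLoop lines [] []
  simpa [split_raw_blocks, split_raw_blocks_alt, pvPrepend, pvExtract] using h
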